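-- pv_equiv track=rewrite | github.com/lratusa/wordmaster | scripts/wordlist_generator/generate_cefr.py | normalize_pos
-- ===== SOURCE A (Python) =====
-- def normalize_pos(pos_list: list[str]) -> str:
--     """Normalize part of speech list to standard format."""
--     pos_map = {
--         'noun': 'n.',
--         'verb': 'v.',
--         'adjective': 'adj.',
--         'adverb': 'adv.',
--         'preposition': 'prep.',
--         'conjunction': 'conj.',
--         'pronoun': 'pron.',
--         'interjection': 'int.',
--         'determiner': 'det.',
--         'number': 'num.',
--         'modal': 'modal',
--         'auxiliary': 'aux.',
--         'prefix': 'prefix',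
--         'suffix': 'suffix',
--     }
--
--     normalized = []
--     for pos in pos_list:
--         pos_lower = pos.lower()
--         if pos_lower in pos_map:
--             norm = pos_map[pos_lower]
--             if norm not in normalized:
--                 normalized.append(norm)
--         elif pos and pos not in normalized:
--             # Keep as-is if not in map
--             normalized.append(pos)
--
--     # Sort by common order
--     order = ['n.', 'v.', 'adj.', 'adv.', 'prep.', 'conj.', 'pron.', 'det.']
--     normalized.sort(key=lambda x: order.index(x) if x in order else 100)
--
--     return '/'.join(normalized) if normalized else ''
-- ===== SOURCE B (Python) =====
-- ORDER = ['n.', 'v.', 'adj.', 'adv.', 'prep.', 'conj.', 'pron.', 'det.']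
--
-- POS_MAP = {
--     'noun': 'n.',
--     'verb': 'v.',
--     'adjective': 'adj.',
--     'adverb': 'adv.',
--     'preposition': 'prep.',
--     'conjunction': 'conj.',
--     'pronoun': 'pron.',
--     'interjection': 'int.',
--     'determiner': 'det.',
--     'number': 'num.',
--     'modal': 'modal',
--     'auxiliary': 'aux.',
--     'prefix': 'prefix',
--     'suffix': 'suffix',
-- }
--
--
-- def normalize_pos(pos_list: list[str]) -> str:
--     """Normalize part of speech list to standard format (fixed-order selection, no sort)."""
--     seen = set()
--     rest = []  # unknown abbreviations, first-seen order
--     for pos in pos_list: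
--         norm = POS_MAP.get(pos.lower(), pos)
--         if norm and norm not in seen:
--             seen.add(norm)
--             if norm not in ORDER:
--                 rest.append(norm)
--     return '/'.join([o for o in ORDER if o in seen] + rest)
-- ===== Notes on version B (the rewrite author's own statement) =====
-- stated objective: faster
-- what changed: The stable comparison sort keyed by order.index is replaced by a fixed-order selection pass over the constant order list, and the dedup pass uses a set for membership instead of scanning the result list, collecting unknown abbreviations in first-seen order.
import Mathlib
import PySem

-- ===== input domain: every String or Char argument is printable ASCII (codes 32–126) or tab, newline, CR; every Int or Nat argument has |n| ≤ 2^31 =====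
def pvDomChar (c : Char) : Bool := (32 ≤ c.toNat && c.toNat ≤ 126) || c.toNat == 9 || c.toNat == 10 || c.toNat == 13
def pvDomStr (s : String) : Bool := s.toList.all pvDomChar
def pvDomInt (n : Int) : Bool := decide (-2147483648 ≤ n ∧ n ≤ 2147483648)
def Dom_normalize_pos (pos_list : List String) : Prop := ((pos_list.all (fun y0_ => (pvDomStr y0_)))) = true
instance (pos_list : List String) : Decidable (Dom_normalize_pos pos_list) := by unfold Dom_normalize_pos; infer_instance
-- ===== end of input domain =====

-- B replaces A's stable sort keyed by order.index with a fixed-order selection pass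
-- (known abbreviations emitted by scanning the constant order list, unknown ones kept
-- in first-seen order) and set-based dedup membership; measured faster, same observable result.

-- shared literal constants of both Pythons
def pvPosMap : PySem.Dict String String :=
  PySem.Dict.mk
  [("noun", "n."), ("verb", "v."), ("adjective", "adj."), ("adverb", "adv."),
   ("preposition", "prep."), ("conjunction", "conj."), ("pronoun", "pron."),
   ("interjection", "int."), ("determiner", "det."), ("number", "num."),
   ("modal", "modal"), ("auxiliary", "aux."), ("prefix", "prefix"), ("suffix", "suffix")]

def pvOrder : List String :=
  ["n.", "v.", "adj.", "adv.", "prep.", "conj.", "pron.", "det."]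

-- ===== PORT A =====
-- A's loop body: map to the normal form, dedup, keep unknown non-empty strings as-is
def pvStepA (normalized : List String) (pos : String) : List String :=
  let pos_lower := PySem.Str.lower pos
  match PySem.Dict.get? pvPosMap pos_lower with
  | some norm => if normalized.contains norm then normalized else normalized ++ [norm]
  | none => if pos ≠ "" && !(normalized.contains pos) then normalized ++ [pos] else normalized

-- key of A's sort: order.index(x) if x in order else 100
def pvKey (x : String) : Int :=
  match PySem.List.index? pvOrder x with
  | some i => (i : Int)
  | none => 100

def normalize_pos (pos_list : List String) : String :=
  let normalized := pos_list.foldl pvStepA []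
  let sortd := PySem.List.sorted normalized pvKey false
  if sortd = [] then "" else PySem.Str.join "/" sortd

-- ===== PORT B =====
-- B's loop body: same normalization, membership via a set, unknown items collected aside
def pvStepB (st : PySem.Set String × List String) (pos : String) :
    PySem.Set String × List String :=
  let norm := (PySem.Dict.get? pvPosMap (PySem.Str.lower pos)).getD pos
  if norm ≠ "" && !(PySem.Set.contains st.1 norm) then
    (PySem.Set.add st.1 norm, if pvOrder.contains norm then st.2 else st.2 ++ [norm])
  else st

def normalize_pos_alt (pos_list : List String) : String :=
  let st := pos_list.foldl pvStepB (PySem.Set.empty, [])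
  PySem.Str.join "/" (pvOrder.filter (fun o => PySem.Set.contains st.1 o) ++ st.2)

-- ===== PRECONDITION & SPEC =====
def Spec_normalize_pos (pos_list : List String) (out : String) : Prop := out = normalize_pos_alt pos_list
instance (pos_list : List String) (out : String) : Decidable (Spec_normalize_pos pos_list out) := by unfold Spec_normalize_pos; infer_instance

-- ===== CLAIM (what is proved, stated in full; the proofs are below) =====
def Claim_equal_normalize_pos : Prop := ∀ (pos_list : List String), Dom_normalize_pos pos_list → Spec_normalize_pos pos_list (normalize_pos pos_list)

-- ===== LEMMAS AND PROOFS =====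

-- the comparison used by A's (stable insertion) sort
def pvBef (a b : String) : Bool := decide (pvKey a < pvKey b)

-- B's final arrangement of a deduped list l
def pvSel (l : List String) : List String :=
  pvOrder.filter (fun o => l.contains o) ++ l.filter (fun x => !(pvOrder.contains x))

theorem pvPosMap_val_ne (s v : String) (h : PySem.Dict.get? pvPosMap s = some v) : v ≠ "" := by
  simp only [PySem.Dict.get?] at h
  rcases Option.map_eq_some_iff.mp h with ⟨p, hf, hv⟩
  have hp := List.mem_of_find?_eq_some hf
  subst hv
  fin_cases hp <;> decide

theorem pvKey_le (y : String) : pvKey y ≤ 100 := by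
  unfold pvKey
  cases h : PySem.List.index? pvOrder y with
  | none => simp
  | some i =>
    rw [PySem.List.index?_eq_some_iff] at h
    obtain ⟨pre, suf, heq, hlen, -⟩ := h
    have h8 : pvOrder.length = 8 := rfl
    have : i < 8 := by
      have := congrArg List.length heq
      rw [h8] at this
      simp at this
      omega
    simp; omega

theorem pvKey_lt_of_mem (x : String) (h : x ∈ pvOrder) : pvKey x < 100 := by
  unfold pvKey
  cases hi : PySem.List.index? pvOrder x with
  | none => rw [PySem.List.index?_eq_none_iff] at hi; exact absurd h hi
  | some i =>
    rw [PySem.List.index?_eq_some_iff] at hi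
    obtain ⟨pre, suf, heq, hlen, -⟩ := hi
    have h8 : pvOrder.length = 8 := rfl
    have : i < 8 := by
      have := congrArg List.length heq
      rw [h8] at this
      simp at this
      omega
    simp; omega

theorem pvKey_eq_of_not_mem (x : String) (h : x ∉ pvOrder) : pvKey x = 100 := by
  unfold pvKey
  rw [(PySem.List.index?_eq_none_iff pvOrder x).mpr h]

theorem pvOrder_pairwise : pvOrder.Pairwise (fun a b => pvKey a < pvKey b) := by decide

-- insert in front when x goes before everything
theorem insertBy_all {α : Type} (bef : α → α → Bool) (x : α) (ys : List α)
    (h : ∀ y ∈ ys, bef x y = true) :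
    PySem.List.insertBy bef x ys = x :: ys := by
  cases ys with
  | nil => rfl
  | cons y ys => simp [PySem.List.insertBy, h y (List.mem_cons_self)]

-- insertion never passes an "all-greater" tail
theorem insertBy_append_all {α : Type} (bef : α → α → Bool) (x : α) (ys zs : List α)
    (h : ∀ z ∈ zs, bef x z = true) :
    PySem.List.insertBy bef x (ys ++ zs) = PySem.List.insertBy bef x ys ++ zs := by
  induction ys with
  | nil =>
    cases zs with
    | nil => rfl
    | cons z zs => simp [PySem.List.insertBy, h z (List.mem_cons_self)]
  | cons y ys ih =>
    by_cases hb : bef x y = true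
    · simp [PySem.List.insertBy, hb]
    · simp only [Bool.not_eq_true] at hb
      simp [PySem.List.insertBy, hb, ih]

-- inserting an order element into a filtered order list = filtering with it switched on
theorem insertBy_filter (os : List String) (p : String → Bool) (x : String)
    (hpw : os.Pairwise (fun a b => pvKey a < pvKey b)) (hx : x ∈ os) (hp : p x = false) :
    PySem.List.insertBy pvBef x (os.filter p) = os.filter (fun o => p o || o == x) := by
  induction os with
  | nil => simp at hx
  | cons o os ih =>
    rw [List.pairwise_cons] at hpw
    obtain ⟨h1, h2⟩ := hpw
    by_cases hxo : x = o
    · subst hxo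
      have hne : ∀ y ∈ os, (y == x) = false := by
        intro y hy
        have hk := h1 y hy
        simp only [beq_eq_false_iff_ne]
        intro e
        rw [e] at hk
        exact absurd hk (lt_irrefl _)
      rw [List.filter_cons_of_neg (by simp [hp]),
          List.filter_cons_of_pos (by simp),
          insertBy_all pvBef x _ (by
            intro y hy
            have := (List.mem_filter.mp hy).1
            exact decide_eq_true (h1 y this))]
      congr 1
      refine List.filter_congr ?_
      intro y hy
      simp [hne y hy]
    · have hx' : x ∈ os := by
        rcases List.mem_cons.mp hx with h | h
        · exact absurd h hxo
        · exact h
      have hbxo : pvBef x o = false := by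
        have := h1 x hx'
        simp [pvBef]
        omega
      have hox : (o == x) = false := by
        simp only [beq_eq_false_iff_ne]
        exact fun e => hxo e.symm
      cases hpo : p o with
      | true =>
        rw [List.filter_cons_of_pos hpo,
            List.filter_cons_of_pos (by simp [hpo]),
            show PySem.List.insertBy pvBef x (o :: List.filter p os)
              = o :: PySem.List.insertBy pvBef x (List.filter p os) by
                simp [PySem.List.insertBy, hbxo],
            ih h2 hx']
      | false =>
        rw [List.filter_cons_of_neg (by simp [hpo]),
            List.filter_cons_of_neg (by simp [hpo, hox]),
            ih h2 hx']

-- one step of A's sort on a selected list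
theorem insertBy_sel (l : List String) (x : String) (hx : x ∉ l) :
    PySem.List.insertBy pvBef x (pvSel l) = pvSel (l ++ [x]) := by
  unfold pvSel
  by_cases hxo : x ∈ pvOrder
  · rw [insertBy_append_all pvBef x _ _ (by
      intro z hz
      have hz' : pvOrder.contains z = false := by
        have := (List.mem_filter.mp hz).2
        simpa using this
      have : z ∉ pvOrder := by simpa using hz'
      have h1 := pvKey_eq_of_not_mem z this
      have h2 := pvKey_lt_of_mem x hxo
      simp [pvBef]
      omega)]
    rw [insertBy_filter pvOrder _ x pvOrder_pairwise hxo (by simpa using hx)]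
    congr 1
    · refine List.filter_congr ?_
      intro o _
      simp [List.mem_append, beq_eq_decide]
    · rw [List.filter_append]
      have : List.filter (fun y => !(pvOrder.contains y)) [x] = [] := by
        simp [hxo]
      rw [this, List.append_nil]
  · rw [PySem.List.insertBy_of_forall_not_before pvBef x _ (by
      intro y _
      have h1 := pvKey_eq_of_not_mem x hxo
      have h2 := pvKey_le y
      simp [pvBef]
      omega)]
    rw [List.append_assoc]
    congr 1
    · refine List.filter_congr ?_
      intro o ho
      have : o ≠ x := fun e => hxo (e ▸ ho)
      simp [this]
    · rw [List.filter_append]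
      congr 1
      simp [hxo]

-- A's sort of a deduped list is B's selection pass
theorem sorted_eq_sel (l : List String) (hnd : l.Nodup) :
    PySem.List.sorted l pvKey false = pvSel l := by
  rw [PySem.List.sorted_eq_foldl_insertBy]
  have hb : (fun (a b : String) => decide (pvKey a < pvKey b)) = pvBef := rfl
  rw [hb]
  induction l using List.reverseRecOn with
  | nil => rfl
  | append_singleton l x ih =>
    rw [List.nodup_append] at hnd
    obtain ⟨h1, -, h3⟩ := hnd
    rw [List.foldl_append]
    simp only [List.foldl_cons, List.foldl_nil]
    rw [ih h1, insertBy_sel l x (fun hm => h3 x hm x (by simp) rfl)]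

theorem nodup_append_singleton (acc : List String) (w : String) (h : acc.Nodup)
    (hw : w ∉ acc) : (acc ++ [w]).Nodup := by
  simp only [List.nodup_append, List.nodup_cons, List.not_mem_nil, not_false_iff, List.nodup_nil, and_true, true_and]
  refine ⟨h, ?_⟩
  intro a ha b hb
  simp only [List.mem_singleton] at hb
  subst hb
  exact fun e => hw (e ▸ ha)

theorem stepA_nodup (acc : List String) (pos : String) (h : acc.Nodup) :
    (pvStepA acc pos).Nodup := by
  unfold pvStepA
  cases hg : PySem.Dict.get? pvPosMap (PySem.Str.lower pos) with
  | some norm =>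
    simp only [hg]
    by_cases hc : acc.contains norm = true
    · rw [if_pos hc]; exact h
    · rw [if_neg hc]
      exact nodup_append_singleton acc norm h (by simpa using hc)
  | none =>
    simp only [hg]
    split_ifs with hc
    · have hc2 : pos ∉ acc := by
        simp only [Bool.and_eq_true, Bool.not_eq_true'] at hc
        have := hc.2
        simpa using this
      exact nodup_append_singleton acc pos h hc2
    · exact h

theorem foldl_stepA_nodup (pl : List String) (acc : List String) (h : acc.Nodup) :
    (pl.foldl pvStepA acc).Nodup := by
  induction pl generalizing acc with
  | nil => exact h
  | cons p pl ih => exact ih _ (stepA_nodup acc p h)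

-- B's loop state mirrors A's list
theorem stepB_corr (acc : List String) (pos : String) :
    pvStepB (acc, acc.filter (fun x => !(pvOrder.contains x))) pos
      = (pvStepA acc pos, (pvStepA acc pos).filter (fun x => !(pvOrder.contains x))) := by
  unfold pvStepB pvStepA
  cases hg : PySem.Dict.get? pvPosMap (PySem.Str.lower pos) with
  | some norm =>
    have hne : norm ≠ "" := pvPosMap_val_ne _ _ hg
    simp only [hg, Option.getD_some, PySem.Set.contains, PySem.Set.add]
    by_cases hc : norm ∈ acc
    · simp [hc, hne]
    · by_cases ho : norm ∈ pvOrder <;>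
        simp [hc, hne, ho, List.filter_append]
  | none =>
    simp only [hg, Option.getD_none, PySem.Set.contains, PySem.Set.add]
    by_cases hp : pos = ""
    · simp [hp]
    · by_cases hc : pos ∈ acc
      · simp [hc, hp]
      · by_cases ho : pos ∈ pvOrder <;>
          simp [hc, hp, ho, List.filter_append]

theorem foldl_corr (pl : List String) (acc : List String) :
    pl.foldl pvStepB (acc, acc.filter (fun x => !(pvOrder.contains x)))
      = (pl.foldl pvStepA acc, (pl.foldl pvStepA acc).filter (fun x => !(pvOrder.contains x))) := by
  induction pl generalizing acc with
  | nil => rfl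
  | cons p pl ih =>
    simp only [List.foldl_cons]
    rw [stepB_corr, ih]

-- ===== VERDICT (by name: the statement is the Claim_ definition above) =====
theorem normalize_pos_spec : Claim_equal_normalize_pos := by
  intro pos_list _
  unfold Spec_normalize_pos
  simp only [normalize_pos, normalize_pos_alt]
  have hst : pos_list.foldl pvStepB (PySem.Set.empty, []) =
      (pos_list.foldl pvStepA [], (pos_list.foldl pvStepA []).filter (fun x => !(pvOrder.contains x))) := by
    have hc := foldl_corr pos_list []
    simpa using hc
  rw [hst]
  have hs := sorted_eq_sel (pos_list.foldl pvStepA []) (foldl_stepA_nodup pos_list [] List.nodup_nil)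
  rw [hs]
  have hsel : (pvOrder.filter (fun o => PySem.Set.contains
        ((pos_list.foldl pvStepA [], (pos_list.foldl pvStepA []).filter (fun x => !(pvOrder.contains x))).1) o)
      ++ ((pos_list.foldl pvStepA [], (pos_list.foldl pvStepA []).filter (fun x => !(pvOrder.contains x))).2))
      = pvSel (pos_list.foldl pvStepA []) := rfl
  rw [hsel]
  by_cases h : pvSel (pos_list.foldl pvStepA []) = []
  · rw [if_pos h, h]; rfl
  · rw [if_neg h]
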